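-- pv_equiv track=rewrite | github.com/joshanashakya/dissertation | workspace/dataset/java-python/GeeksForGeeks/1552/A/2.py | longestFibonacciSubsequence
-- ===== SOURCE A (Python) =====
-- def createHash(hash,maxElement):
--     prev = 0
--     curr = 1
--     hash.add(prev)
--     hash.add(curr)
--
--     while (curr <= maxElement):
--         temp = curr + prev
--         hash.add(temp)
--         prev = curr
--         curr = temp
--
-- def longestFibonacciSubsequence(arr, n):
--     hash = set()
--     createHash(hash,max(arr))
--
--     answer = 0
--
--     for i in range(n):
--         if (arr[i] in hash):
--             answer += 1
--
--     return answer
-- ===== SOURCE B (Python) =====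
-- def longestFibonacciSubsequence(arr, n):
--     # Per-element Fibonacci test instead of a precomputed hash set.
--     def is_fib(x):
--         a, b = 0, 1
--         while b < x:
--             a, b = b, a + b
--         return x == a or x == b
--
--     return sum(1 for i in range(n) if is_fib(arr[i]))
-- ===== Notes on version B (the rewrite author's own statement) =====
-- stated objective: alternative
-- what changed: B drops A's precomputed Fibonacci hash set (built up to max(arr)) and instead tests each counted element independently with an in-place two-variable Fibonacci iteration, summing a comprehension.
import Mathlib
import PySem

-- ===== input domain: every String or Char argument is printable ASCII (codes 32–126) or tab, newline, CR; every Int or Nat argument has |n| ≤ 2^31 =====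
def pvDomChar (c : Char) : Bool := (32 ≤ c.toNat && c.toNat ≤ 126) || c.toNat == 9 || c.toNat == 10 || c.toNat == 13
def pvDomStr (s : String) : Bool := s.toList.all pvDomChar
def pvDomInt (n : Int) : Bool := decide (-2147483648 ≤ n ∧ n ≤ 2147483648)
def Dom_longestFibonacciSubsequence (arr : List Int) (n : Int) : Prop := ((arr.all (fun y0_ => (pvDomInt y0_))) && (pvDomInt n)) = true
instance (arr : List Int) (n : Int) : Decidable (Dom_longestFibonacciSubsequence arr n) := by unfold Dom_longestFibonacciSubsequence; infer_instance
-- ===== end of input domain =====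

-- B replaces A's precomputed Fibonacci hash set with an independent per-element
-- Fibonacci-iteration test (alternative algorithm, similar cost). Equivalence of
-- the return value is proved on Pre_ (A raises ValueError/IndexError outside it).

-- ===== PORT A =====
-- the while loop of createHash; the Prop arguments are invariants of the caller's
-- initial state (prev=0, curr=1) carried only to justify termination
def fibLoopA (maxElement : Int) (prev curr : Int) (h : PySem.Set Int)
    (hp : 0 ≤ prev) (hc : 1 ≤ curr) (hpc : prev ≤ curr) : PySem.Set Int :=
  if curr ≤ maxElement then
    fibLoopA maxElement curr (curr + prev) (PySem.Set.add h (curr + prev))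
      (by omega) (by omega) (by omega)
  else h
termination_by (2 * maxElement + 2 - prev - curr).toNat
decreasing_by omega

def createHash (h : PySem.Set Int) (maxElement : Int) : PySem.Set Int :=
  let h1 := PySem.Set.add h 0
  let h2 := PySem.Set.add h1 1
  fibLoopA maxElement 0 1 h2 (by omega) (by omega) (by omega)

def longestFibonacciSubsequence (arr : List Int) (n : Int) : Int :=
  match PySem.List.max? arr (fun x => x) with
  | none => 0   -- max([]) raises ValueError; excluded by Pre_
  | some m =>
    let hs := createHash PySem.Set.empty m
    (PySem.List.pyRange 0 n 1).foldl
      (fun answer i =>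
        if PySem.Set.contains hs (PySem.List.pyGetD arr i 0) then answer + 1 else answer) 0

-- ===== PORT B =====
-- the inner while loop of is_fib; Prop arguments justify termination from the
-- caller's initial state (a=0, b=1)
def fibLoopB (x : Int) (a b : Int) (ha : 0 ≤ a) (hb : 1 ≤ b) (hab : a ≤ b) : Bool :=
  if b < x then fibLoopB x b (a + b) (by omega) (by omega) (by omega)
  else (x == a || x == b)
termination_by (2 * x - a - b).toNat
decreasing_by omega

def isFib (x : Int) : Bool := fibLoopB x 0 1 (by omega) (by omega) (by omega)

def longestFibonacciSubsequence_alt (arr : List Int) (n : Int) : Int :=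
  (PySem.List.pyRange 0 n 1).foldl
    (fun acc i => if isFib (PySem.List.pyGetD arr i 0) then acc + 1 else acc) 0

-- ===== PRECONDITION & SPEC =====
-- Pre_ excludes exactly the inputs on which A raises: empty arr (ValueError from
-- max(arr)) and n > len(arr) (IndexError from arr[i]).
def Pre_longestFibonacciSubsequence (arr : List Int) (n : Int) : Prop :=
  arr ≠ [] ∧ n ≤ (arr.length : Int)
instance (arr : List Int) (n : Int) : Decidable (Pre_longestFibonacciSubsequence arr n) := by
  unfold Pre_longestFibonacciSubsequence; infer_instance

def pvWitness_longestFibonacciSubsequence : List Int × Int := ([1, 4, 8, 13, -2], 5)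

def Spec_longestFibonacciSubsequence (arr : List Int) (n : Int) (out : Int) : Prop := out = longestFibonacciSubsequence_alt arr n
instance (arr : List Int) (n : Int) (out : Int) : Decidable (Spec_longestFibonacciSubsequence arr n out) := by unfold Spec_longestFibonacciSubsequence; infer_instance

-- ===== CLAIM (what is proved, stated in full; the proofs are below) =====
def Claim_equal_longestFibonacciSubsequence : Prop := ∀ (arr : List Int) (n : Int), Dom_longestFibonacciSubsequence arr n → Pre_longestFibonacciSubsequence arr n → Spec_longestFibonacciSubsequence arr n (longestFibonacciSubsequence arr n)

-- ===== LEMMAS AND PROOFS =====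

-- arithmetic helper: m ≤ fib (m+2)
lemma fib_two_ge (m : ℕ) : m ≤ Nat.fib (m + 2) := by
  induction m with
  | zero => simp
  | succ k ih =>
    have h1 : 1 ≤ Nat.fib (k + 1) := Nat.fib_pos.mpr (by omega)
    have h2 : Nat.fib (k + 3) = Nat.fib (k + 1) + Nat.fib (k + 2) := Nat.fib_add_two
    show k + 1 ≤ Nat.fib (k + 3)
    omega

lemma fib_succ_ge (m : ℕ) : m ≤ Nat.fib (m + 1) + 1 := by
  cases m with
  | zero => simp
  | succ k =>
    have := fib_two_ge k
    show k + 1 ≤ Nat.fib (k + 2) + 1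
    omega

lemma fib_ge (m : ℕ) : m ≤ Nat.fib m + 2 := by
  cases m with
  | zero => simp
  | succ k => have := fib_succ_ge k; omega

-- characterization of B's inner loop, on states that are consecutive Fibonacci pairs
lemma fibLoopB_true_iff : ∀ (k : Nat) (x a b : Int) (ha : 0 ≤ a) (hb : 1 ≤ b) (hab : a ≤ b)
    (m : Nat), a = (Nat.fib m : Int) → b = (Nat.fib (m+1) : Int) →
    x.toNat + 2 - m ≤ k → (Nat.fib m : Int) < x →
    (fibLoopB x a b ha hb hab = true ↔ ∃ j, (Nat.fib j : Int) = x) := by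
  intro k
  induction k with
  | zero =>
    intro x a b ha hb hab m hma hmb hk hlt
    exfalso
    have h1 : (m : Int) ≤ (Nat.fib m : Int) + 2 := by exact_mod_cast fib_ge m
    have hx : 0 < x := lt_of_le_of_lt (by positivity) hlt
    omega
  | succ k ih =>
    intro x a b ha hb hab m hma hmb hk hlt
    rw [fibLoopB]
    by_cases hcond : b < x
    · rw [if_pos hcond]
      have hsum : a + b = (Nat.fib (m + 2) : Int) := by
        rw [hma, hmb, Nat.fib_add_two]; push_cast; ring
      apply ih x b (a + b) _ _ _ (m + 1) hmb hsum (by omega)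
      rw [← hmb]; exact hcond
    · rw [if_neg hcond]
      have hcond' : x ≤ b := by omega
      simp only [Bool.or_eq_true, beq_iff_eq]
      constructor
      · rintro (h | h)
        · exfalso; omega
        · exact ⟨m + 1, by omega⟩
      · rintro ⟨j, hj⟩
        right
        by_cases hjm : j ≤ m
        · exfalso
          have h2 : Nat.fib j ≤ Nat.fib m := Nat.fib_mono hjm
          have h3 : (Nat.fib j : Int) ≤ (Nat.fib m : Int) := by exact_mod_cast h2
          omega
        · have h2 : Nat.fib (m + 1) ≤ Nat.fib j := Nat.fib_mono (by omega)
          have h3 : (Nat.fib (m + 1) : Int) ≤ (Nat.fib j : Int) := by exact_mod_cast h2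
          omega

lemma isFib_iff (x : Int) : isFib x = true ↔ ∃ j, (Nat.fib j : Int) = x := by
  unfold isFib
  by_cases hx : 0 < x
  · exact fibLoopB_true_iff (x.toNat + 2) x 0 1 (by omega) (by omega) (by omega) 0
      (by simp) (by simp) (by omega) (by simpa using hx)
  · rw [fibLoopB]
    rw [if_neg (by omega)]
    simp only [Bool.or_eq_true, beq_iff_eq]
    constructor
    · rintro (h | h)
      · exact ⟨0, by simp [h]⟩
      · exact ⟨1, by simp [h]⟩
    · rintro ⟨j, hj⟩
      have h0 : (0 : Int) ≤ (Nat.fib j : Int) := by positivity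
      left; omega

-- once A's loop has stopped (curr > M), the set already holds every Fibonacci value ≤ M
lemma fibLoopA_stopped (M curr : Int) (s : PySem.Set Int) (m : Nat)
    (hmb : curr = (Nat.fib (m+1) : Int)) (hcurr : M < curr)
    (hs : ∀ y, y ∈ s ↔ ∃ j ≤ m + 1, (Nat.fib j : Int) = y)
    (y : Int) (hy : y ≤ M) : y ∈ s ↔ ∃ j, (Nat.fib j : Int) = y := by
  rw [hs y]
  constructor
  · rintro ⟨j, _, hj⟩; exact ⟨j, hj⟩
  · rintro ⟨j, hj⟩
    refine ⟨j, ?_, hj⟩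
    by_contra hgt
    have h2 : Nat.fib (m + 1) ≤ Nat.fib j := Nat.fib_mono (by omega)
    have h3 : (Nat.fib (m + 1) : Int) ≤ (Nat.fib j : Int) := by exact_mod_cast h2
    omega

-- characterization of A's set-building loop, on states that are consecutive Fibonacci pairs
lemma fibLoopA_mem_iff : ∀ (k : Nat) (M prev curr : Int) (s : PySem.Set Int)
    (hp : 0 ≤ prev) (hc : 1 ≤ curr) (hpc : prev ≤ curr) (m : Nat),
    prev = (Nat.fib m : Int) → curr = (Nat.fib (m+1) : Int) →
    M.toNat + 2 - m ≤ k →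
    (∀ y, y ∈ s ↔ ∃ j ≤ m + 1, (Nat.fib j : Int) = y) →
    ∀ y, y ≤ M → (y ∈ fibLoopA M prev curr s hp hc hpc ↔ ∃ j, (Nat.fib j : Int) = y) := by
  intro k
  induction k with
  | zero =>
    intro M prev curr s hp hc hpc m hma hmb hk hs y hy
    -- the measure bound forces m ≥ M.toNat + 2, hence curr = fib (m+1) > M: loop stops now
    have h1 : (m : Int) ≤ (Nat.fib (m + 1) : Int) + 1 := by exact_mod_cast fib_succ_ge m
    have hcurr : M < curr := by omega
    rw [fibLoopA, if_neg (by omega)]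
    exact fibLoopA_stopped M curr s m hmb hcurr hs y hy
  | succ k ih =>
    intro M prev curr s hp hc hpc m hma hmb hk hs y hy
    rw [fibLoopA]
    by_cases hcond : curr ≤ M
    · rw [if_pos hcond]
      have hsum : curr + prev = (Nat.fib (m + 2) : Int) := by
        rw [hma, hmb, Nat.fib_add_two]; push_cast; ring
      apply ih M curr (curr + prev) _ _ _ _ (m + 1) hmb hsum (by omega) _ y hy
      intro z
      rw [PySem.Set.mem_add _ _ _, hs z]
      constructor
      · rintro (⟨j, hj1, hj2⟩ | hz)
        · exact ⟨j, by omega, hj2⟩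
        · exact ⟨m + 2, by omega, by omega⟩
      · rintro ⟨j, hj1, hj2⟩
        by_cases h : j ≤ m + 1
        · exact Or.inl ⟨j, h, hj2⟩
        · have : j = m + 2 := by omega
          subst this; exact Or.inr (by omega)
    · rw [if_neg hcond]
      exact fibLoopA_stopped M curr s m hmb (by omega) hs y hy

lemma createHash_mem_iff (M y : Int) (hy : y ≤ M) :
    (y ∈ createHash PySem.Set.empty M) ↔ ∃ j, (Nat.fib j : Int) = y := by
  unfold createHash
  apply fibLoopA_mem_iff (M.toNat + 2) M 0 1 _ _ _ _ 0 (by simp) (by simp) (by omega) _ y hy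
  intro z
  constructor
  · intro hz
    rcases (PySem.Set.mem_add _ _ _).mp hz with hz | hz
    · rcases (PySem.Set.mem_add _ _ _).mp hz with hz | hz
      · simp [PySem.Set.empty] at hz
      · exact ⟨0, by omega, by simp [hz]⟩
    · exact ⟨1, by omega, by simp [hz]⟩
  · rintro ⟨j, hj1, hj2⟩
    rw [PySem.Set.mem_add _ _ _, PySem.Set.mem_add _ _ _]
    interval_cases j
    · left; right; simpa using hj2.symm
    · right; simpa using hj2.symm

-- ===== VERDICT (by name: the statement is the Claim_ definition above) =====
theorem longestFibonacciSubsequence_spec : Claim_equal_longestFibonacciSubsequence := by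
  intro arr n hdom hpre
  obtain ⟨hne, hlen⟩ := hpre
  unfold Spec_longestFibonacciSubsequence
  unfold longestFibonacciSubsequence longestFibonacciSubsequence_alt
  cases hmax : PySem.List.max? arr (fun x => x) with
  | none => exact absurd ((PySem.List.max?_eq_none_iff _ _).mp hmax) hne
  | some M =>
    apply PySem.List.foldl_congr_mem
    intro acc i hi
    have hi' := PySem.List.mem_pyRange_one.mp hi
    have hrange : PySem.Raise.InRange arr.length i := by
      constructor <;> omega
    have hmem : PySem.List.pyGetD arr i 0 ∈ arr := PySem.List.pyGetD_mem _ _ hrange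
    have hle : PySem.List.pyGetD arr i 0 ≤ M := PySem.List.max?_isMax hmax _ hmem
    have hsame : PySem.Set.contains (createHash PySem.Set.empty M) (PySem.List.pyGetD arr i 0)
        = isFib (PySem.List.pyGetD arr i 0) := by
      rcases h : isFib (PySem.List.pyGetD arr i 0) with _ | _
      · rw [← Bool.not_eq_true] at h ⊢
        intro hc
        exact h ((isFib_iff _).mpr ((createHash_mem_iff M _ hle).mp ((PySem.Set.contains_iff _ _).mp hc)))
      · exact (PySem.Set.contains_iff _ _).mpr ((createHash_mem_iff M _ hle).mpr ((isFib_iff _).mp h))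
    rw [hsame]
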